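-- pv_equiv track=rewrite | github.com/PavelM110/EGE | Lessons/Year-25/February/27-02-25/Task-25-18620.py | f
-- ===== SOURCE A (Python) =====
-- def f(n):
--     divs = set()
--     for i in range(2, int(n **.5) + 1):
--         if n % i == 0:
--             divs |= {i, n // i}
--     divs = sorted(divs)
--     if len(divs) >= 2: return divs[-1] + divs[-2]
--     return 0
-- ===== SOURCE B (Python) =====
-- def f(n):
--     # Divisor duality: the two largest proper divisors are n//d1 and n//d2
--     # where d1 < d2 are the two smallest divisors > 1; scan only up to sqrt(n).
--     d1 = 0
--     i = 2
--     while i * i <= n: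
--         if n % i == 0:
--             if d1 == 0:
--                 d1 = i
--             else:
--                 return n // d1 + n // i
--         i += 1
--     if d1 == 0:
--         return 0
--     c = n // d1
--     return 0 if c == d1 else d1 + c
-- ===== Notes on version B (the rewrite author's own statement) =====
-- stated objective: alternative
-- what changed: Instead of collecting all divisor pairs into a set and sorting it, B scans for only the two smallest nontrivial divisors and returns n//d1 + n//d2 by divisor duality (no set, no sort, early exit at the second divisor).
import Mathlib
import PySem

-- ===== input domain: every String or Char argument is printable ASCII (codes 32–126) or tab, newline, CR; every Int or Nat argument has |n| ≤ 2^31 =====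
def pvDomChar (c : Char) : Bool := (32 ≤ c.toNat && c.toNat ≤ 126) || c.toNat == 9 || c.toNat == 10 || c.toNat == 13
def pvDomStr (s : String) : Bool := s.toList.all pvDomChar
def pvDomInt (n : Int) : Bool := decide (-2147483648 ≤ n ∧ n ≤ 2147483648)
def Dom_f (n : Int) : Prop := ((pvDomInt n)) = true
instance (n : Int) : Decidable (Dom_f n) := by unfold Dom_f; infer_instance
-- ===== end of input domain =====

-- B replaces A's build-all-divisors-set-and-sort by divisor duality: it scans for the two smallest
-- nontrivial divisors and derives the two largest proper divisors as n//d1, n//d2 (alternative).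

-- ===== PORT A =====
-- int(n ** .5) = isqrt(n) exactly for 0 ≤ n ≤ 2^31 (doubles are exact there); negative n raise (outside Pre_f)
def f (n : Int) : Int :=
  let r : Int := Int.ofNat (Nat.sqrt n.toNat)
  let divs : PySem.Set Int :=
    (PySem.List.pyRange 2 (r + 1) 1).foldl
      (fun s i =>
        if PySem.Int.mod n i = 0 then
          PySem.Set.add (PySem.Set.add s i) (PySem.Int.floordiv n i)
        else s)
      PySem.Set.empty
  let ds := PySem.List.sorted divs (fun x => x) false
  if 2 ≤ ds.length then PySem.List.pyGetD ds (-1) 0 + PySem.List.pyGetD ds (-2) 0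
  else 0

-- ===== PORT B =====
-- the while-loop of Source B: i counts up while i*i ≤ n, d1 holds the first divisor found (0 = none yet)
def fGo (n i d1 : Int) : Int :=
  if h : i * i ≤ n then
    if PySem.Int.mod n i = 0 then
      if d1 = 0 then fGo n (i + 1) i
      else PySem.Int.floordiv n d1 + PySem.Int.floordiv n i
    else fGo n (i + 1) d1
  else
    if d1 = 0 then 0
    else
      let c := PySem.Int.floordiv n d1
      if c = d1 then 0 else d1 + c
termination_by (n + 1 - i).toNat
decreasing_by
  all_goals
    have hin : i ≤ n := by
      rcases (by omega : i ≤ 0 ∨ 0 < i) with h0 | h0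
      · have : (0 : Int) ≤ i * i := mul_self_nonneg i
        omega
      · have : i * 1 ≤ i * i := by
          apply mul_le_mul_of_nonneg_left _ (le_of_lt h0)
          omega
        omega
  all_goals omega

def f_alt (n : Int) : Int := fGo n 2 0

-- ===== PRECONDITION & SPEC =====
-- Pre_f excludes negative n, on which A raises TypeError (int() of the complex n ** .5)
def Pre_f (n : Int) : Prop := 0 ≤ n
instance (n : Int) : Decidable (Pre_f n) := by unfold Pre_f; infer_instance
def pvWitness_f : Int := 12

def Spec_f (n : Int) (out : Int) : Prop := out = f_alt n
instance (n : Int) (out : Int) : Decidable (Spec_f n out) := by unfold Spec_f; infer_instance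

-- ===== CLAIM (what is proved, stated in full; the proofs are below) =====
def Claim_equal_f : Prop := ∀ (n : Int), Dom_f n → Pre_f n → Spec_f n (f n)

-- ===== LEMMAS AND PROOFS =====

-- the increasing list of divisors of n in [i, r]
def divFrom (n i r : Int) : List Int :=
  (PySem.List.pyRange i (r + 1) 1).filter (fun j => decide (PySem.Int.mod n j = 0))

-- the value Source B returns after the loop ends with first divisor d (n//d = d on prime squares)
def after (n d : Int) : Int :=
  let c := PySem.Int.floordiv n d
  if c = d then 0 else d + c

-- what fGo computes, as a function of the remaining divisor list
def fSpecFun (n d1 : Int) : List Int → Int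
  | [] => if d1 = 0 then 0 else after n d1
  | [d] => if d1 = 0 then after n d else PySem.Int.floordiv n d1 + PySem.Int.floordiv n d
  | d :: e :: _ => if d1 = 0 then PySem.Int.floordiv n d + PySem.Int.floordiv n e
                   else PySem.Int.floordiv n d1 + PySem.Int.floordiv n d

theorem sq_le_iff_le_sqrt (n i : Int) (hn : 0 ≤ n) (hi : 1 ≤ i) :
    i * i ≤ n ↔ i ≤ Int.ofNat (Nat.sqrt n.toNat) := by
  obtain ⟨m, rfl⟩ : ∃ m : ℕ, n = ↑m := ⟨n.toNat, by omega⟩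
  obtain ⟨k, rfl⟩ : ∃ k : ℕ, i = ↑k := ⟨i.toNat, by omega⟩
  have hm : (↑m : Int).toNat = m := by omega
  rw [hm, Int.ofNat_eq_natCast]
  constructor
  · intro h
    have h' : k * k ≤ m := by exact_mod_cast h
    have := Nat.le_sqrt.mpr h'
    omega
  · intro h
    have hk : k ≤ Nat.sqrt m := by omega
    have h' : k * k ≤ m := le_trans (Nat.mul_le_mul hk hk) (by simpa [pow_two] using Nat.sqrt_le' m)
    exact_mod_cast h'

theorem fGo_spec (n : Int) (hn : 0 ≤ n) :
    ∀ (k : Nat) (i d1 : Int), 1 ≤ i → (Int.ofNat (Nat.sqrt n.toNat) + 1 - i).toNat = k →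
      fGo n i d1 = fSpecFun n d1 (divFrom n i (Int.ofNat (Nat.sqrt n.toNat))) := by
  intro k
  induction k with
  | zero =>
    intro i d1 hi hk
    have hr : (0 : Int) ≤ Int.ofNat (Nat.sqrt n.toNat) := Int.natCast_nonneg _
    have hgt : Int.ofNat (Nat.sqrt n.toNat) < i := by omega
    have hsq : ¬ i * i ≤ n := fun h => by
      have := (sq_le_iff_le_sqrt n i hn hi).mp h; omega
    rw [fGo, dif_neg hsq]
    have hnil : divFrom n i (Int.ofNat (Nat.sqrt n.toNat)) = [] := by
      unfold divFrom
      rw [PySem.List.pyRange_one_eq_nil (by omega)]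
      rfl
    rw [hnil]
    simp [fSpecFun, after]
  | succ k ih =>
    intro i d1 hi hk
    have hr : (0 : Int) ≤ Int.ofNat (Nat.sqrt n.toNat) := Int.natCast_nonneg _
    have hle : i ≤ Int.ofNat (Nat.sqrt n.toNat) := by omega
    have hsq : i * i ≤ n := (sq_le_iff_le_sqrt n i hn hi).mpr hle
    have hcons : divFrom n i (Int.ofNat (Nat.sqrt n.toNat)) =
        if PySem.Int.mod n i = 0 then i :: divFrom n (i + 1) (Int.ofNat (Nat.sqrt n.toNat))
        else divFrom n (i + 1) (Int.ofNat (Nat.sqrt n.toNat)) := by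
      unfold divFrom
      rw [PySem.List.pyRange_one_cons (by omega)]
      by_cases hm : PySem.Int.mod n i = 0 <;> simp [hm]
    rw [fGo, dif_pos hsq]
    by_cases hm : PySem.Int.mod n i = 0
    · rw [if_pos hm, hcons, if_pos hm]
      by_cases hd : d1 = 0
      · rw [if_pos hd, hd, ih (i + 1) i (by omega) (by omega)]
        rcases divFrom n (i + 1) (Int.ofNat (Nat.sqrt n.toNat)) with _ | ⟨d, _ | ⟨e, t⟩⟩ <;>
          simp [fSpecFun, after] <;> omega
      · rw [if_neg hd]
        rcases divFrom n (i + 1) (Int.ofNat (Nat.sqrt n.toNat)) with _ | ⟨d, _ | ⟨e, t⟩⟩ <;>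
          simp [fSpecFun, hd]
    · rw [if_neg hm, hcons, if_neg hm]
      exact ih (i + 1) d1 (by omega) (by omega)

theorem mem_foldS (n : Int) (L : List Int) (s0 : PySem.Set Int) (x : Int) :
    (x ∈ L.foldl (fun s i => if PySem.Int.mod n i = 0 then
        PySem.Set.add (PySem.Set.add s i) (PySem.Int.floordiv n i) else s) s0) ↔
      x ∈ s0 ∨ ∃ i ∈ L, PySem.Int.mod n i = 0 ∧ (x = i ∨ x = PySem.Int.floordiv n i) := by
  induction L generalizing s0 with
  | nil => simp
  | cons j L ih =>
    simp only [List.foldl_cons]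
    rw [ih]
    by_cases hm : PySem.Int.mod n j = 0
    · rw [if_pos hm]
      simp only [PySem.Set.mem_add, List.mem_cons]
      constructor
      · rintro (((hs | rfl) | rfl) | ⟨i, hi, h1, h2⟩)
        · exact Or.inl hs
        · exact Or.inr ⟨x, Or.inl rfl, hm, Or.inl rfl⟩
        · exact Or.inr ⟨j, Or.inl rfl, hm, Or.inr rfl⟩
        · exact Or.inr ⟨i, Or.inr hi, h1, h2⟩
      · rintro (hs | ⟨i, hij, h1, h2⟩)
        · exact Or.inl (Or.inl (Or.inl hs))
        · rcases hij with rfl | hi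
          · rcases h2 with rfl | rfl
            · exact Or.inl (Or.inl (Or.inr rfl))
            · exact Or.inl (Or.inr rfl)
          · exact Or.inr ⟨i, hi, h1, h2⟩
    · rw [if_neg hm]
      simp only [List.mem_cons]
      constructor
      · rintro (hs | ⟨i, hi, h1, h2⟩)
        · exact Or.inl hs
        · exact Or.inr ⟨i, Or.inr hi, h1, h2⟩
      · rintro (hs | ⟨i, hij, h1, h2⟩)
        · exact Or.inl hs
        · rcases hij with rfl | hi
          · exact absurd h1 hm
          · exact Or.inr ⟨i, hi, h1, h2⟩

theorem nodup_foldS (n : Int) (L : List Int) (s0 : PySem.Set Int) (h : s0.Nodup) :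
    (L.foldl (fun s i => if PySem.Int.mod n i = 0 then
        PySem.Set.add (PySem.Set.add s i) (PySem.Int.floordiv n i) else s) s0).Nodup := by
  induction L generalizing s0 with
  | nil => simpa
  | cons j L ih =>
    simp only [List.foldl_cons]
    apply ih
    split
    · exact PySem.Set.nodup_add _ _ (PySem.Set.nodup_add _ _ h)
    · exact h

theorem eq_sing (l : List Int) (a : Int) (hnd : l.Nodup) (h : ∀ x, x ∈ l ↔ x = a) : l = [a] := by
  rcases l with _ | ⟨x, _ | ⟨y, t⟩⟩
  · exact absurd ((h a).mpr rfl) (by simp)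
  · have := (h x).mp (by simp)
    simp [this]
  · have hx := (h x).mp (by simp)
    have hy := (h y).mp (by simp)
    subst hx; subst hy
    simp at hnd

theorem max_last (ds : List Int) (b : Int) (hp : ds.Pairwise (· < ·)) (hb : b ∈ ds)
    (hub : ∀ x ∈ ds, x ≤ b) : ∃ t, ds = t ++ [b] := by
  rcases List.eq_nil_or_concat ds with rfl | ⟨t, l, rfl⟩
  · simp at hb
  · rw [List.concat_eq_append] at *
    have hlt : ∀ x ∈ t, x < l := fun x hx =>
      (List.pairwise_append.mp hp).2.2 x hx l (by simp)
    have hlb : l ≤ b := hub l (by simp)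
    rcases List.mem_append.mp hb with hbt | hbl
    · exact absurd (hlt b hbt) (by omega)
    · simp only [List.mem_singleton] at hbl
      exact ⟨t, by rw [hbl]⟩

theorem last_two (ds : List Int) (a b : Int) (hp : ds.Pairwise (· < ·)) (hab : b < a)
    (ha : a ∈ ds) (hb : b ∈ ds) (hub : ∀ x ∈ ds, x = a ∨ x ≤ b) :
    ∃ t, ds = t ++ [b, a] := by
  obtain ⟨t, rfl⟩ := max_last ds a hp ha (fun x hx => by rcases hub x hx with rfl | h <;> omega)
  have hpt : t.Pairwise (· < ·) := (List.pairwise_append.mp hp).1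
  have hlt : ∀ x ∈ t, x < a := fun x hx => (List.pairwise_append.mp hp).2.2 x hx a (by simp)
  have hbt : b ∈ t := by
    rcases List.mem_append.mp hb with h | h
    · exact h
    · simp only [List.mem_singleton] at h; omega
  obtain ⟨t', rfl⟩ := max_last t b hpt hbt (fun x hx => by
    rcases hub x (List.mem_append.mpr (Or.inl hx)) with rfl | h
    · exact absurd (hlt x hx) (by omega)
    · exact h)
  exact ⟨t', by simp⟩

theorem getD_last1 (t : List Int) (u v d : Int) :
    PySem.List.pyGetD (t ++ [u, v]) (-1) d = v := by
  have h : t ++ [u, v] = (t ++ [u]) ++ [v] := by simp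
  rw [h, PySem.List.pyGetD_neg_one_append_singleton]

theorem getD_last2 (t : List Int) (u v d : Int) :
    PySem.List.pyGetD (t ++ [u, v]) (-2) d = u := by
  rw [PySem.List.pyGetD_neg_ofNat (t ++ [u, v]) 2 d (by omega) (by simp)]
  simp

theorem le_fdiv (n i : Int) (h0 : 0 < i) (h : i * i ≤ n) : i ≤ PySem.Int.floordiv n i :=
  (PySem.Int.le_floordiv_iff_mul_le h0).mpr h

theorem fdiv_nonneg' (n j : Int) (h0 : 0 < j) (hn : 0 ≤ n) : 0 ≤ PySem.Int.floordiv n j :=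
  (PySem.Int.le_floordiv_iff_mul_le h0).mpr (by omega)

theorem fdiv_mono (n i j : Int) (h0 : 0 < i) (hij : i ≤ j) (hn : 0 ≤ n) :
    PySem.Int.floordiv n j ≤ PySem.Int.floordiv n i := by
  have hj : 0 < j := by omega
  have h1 : PySem.Int.floordiv n j * j ≤ n := by
    have h2 := PySem.Int.floordiv_mul_add_mod n j
    have h3 := PySem.Int.mod_nonneg n hj
    omega
  rw [PySem.Int.le_floordiv_iff_mul_le h0]
  calc PySem.Int.floordiv n j * i ≤ PySem.Int.floordiv n j * j :=
        mul_le_mul_of_nonneg_left hij (fdiv_nonneg' n j hj hn)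
    _ ≤ n := h1

theorem fdiv_inj (n i j : Int) (hi : 0 < i) (hj : 0 < j) (hdi : i ∣ n) (hdj : j ∣ n)
    (hn : 0 < n) (h : PySem.Int.floordiv n i = PySem.Int.floordiv n j) : i = j := by
  rw [PySem.Int.floordiv_eq_ediv_of_pos hi, PySem.Int.floordiv_eq_ediv_of_pos hj] at h
  have h1 : n / i * i = n := Int.ediv_mul_cancel hdi
  have h2 : n / j * j = n := Int.ediv_mul_cancel hdj
  have hq : 0 < n / i := by nlinarith [h1]
  have h3 : n / i * i = n / i * j := by rw [h1, h, h2]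
  exact mul_left_cancel₀ (by omega : n / i ≠ 0) h3

theorem f_eq_spec (n : Int) (hn : 0 ≤ n) :
    f n = fSpecFun n 0 (divFrom n 2 (Int.ofNat (Nat.sqrt n.toNat))) := by
  have hr0 : (0:Int) ≤ Int.ofNat (Nat.sqrt n.toNat) := Int.natCast_nonneg _
  set r : Int := Int.ofNat (Nat.sqrt n.toNat) with hrdef
  set S : PySem.Set Int :=
    (PySem.List.pyRange 2 (r + 1) 1).foldl
      (fun s i =>
        if PySem.Int.mod n i = 0 then
          PySem.Set.add (PySem.Set.add s i) (PySem.Int.floordiv n i)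
        else s)
      PySem.Set.empty with hSdef
  have hgoal : f n = (if 2 ≤ (PySem.List.sorted S (fun x => x) false).length then
      PySem.List.pyGetD (PySem.List.sorted S (fun x => x) false) (-1) 0 +
      PySem.List.pyGetD (PySem.List.sorted S (fun x => x) false) (-2) 0
    else 0) := by
    simp only [f, hSdef, hrdef]
  rw [hgoal]
  have hmem : ∀ x, x ∈ S ↔ ∃ i ∈ divFrom n 2 r, x = i ∨ x = PySem.Int.floordiv n i := by
    intro x
    rw [hSdef, mem_foldS]
    unfold divFrom
    simp only [List.mem_filter, decide_eq_true_eq]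
    constructor
    · rintro (hs | ⟨i, hi, h1, h2⟩)
      · exact absurd hs (by simp [PySem.Set.empty])
      · exact ⟨i, ⟨hi, h1⟩, h2⟩
    · rintro ⟨i, ⟨hi, h1⟩, h2⟩
      exact Or.inr ⟨i, hi, h1, h2⟩
  have hnd : S.Nodup := nodup_foldS n _ _ (by simp [PySem.Set.empty])
  have hDfact : ∀ i ∈ divFrom n 2 r, 2 ≤ i ∧ i ≤ r ∧ i ∣ n := by
    intro i hi
    unfold divFrom at hi
    rw [List.mem_filter] at hi
    obtain ⟨hir, hpi⟩ := hi
    rw [PySem.List.mem_pyRange_one] at hir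
    simp only [decide_eq_true_eq] at hpi
    exact ⟨by omega, by omega, (PySem.Int.mod_eq_zero_iff_dvd n i).mp hpi⟩
  have hDpair : (divFrom n 2 r).Pairwise (· < ·) :=
    List.Pairwise.filter _ (PySem.List.pairwise_lt_pyRange_one 2 (r + 1))
  rcases hD : divFrom n 2 r with _ | ⟨d1, D2⟩
  · -- no divisor at all: the set is empty
    have hS : S = [] := by
      rcases hSe : S with _ | ⟨y, t⟩
      · rfl
      · have := (hmem y).mp (by rw [hSe]; simp)
        rw [hD] at this
        simp at this
    have hsorted : PySem.List.sorted S (fun x => x) false = [] :=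
      PySem.List.sorted_eq_of_perm_of_pairwise_lt S [] _ (by rw [hS]) (by simp)
    rw [hsorted]
    simp [fSpecFun]
  · obtain ⟨hd2, hdr, hdvd⟩ := hDfact d1 (by rw [hD]; simp)
    have hrsq : r * r ≤ n := (sq_le_iff_le_sqrt n r hn (by omega)).mpr le_rfl
    have hnpos : 0 < n := by nlinarith
    have hd1sq : d1 * d1 ≤ n := by nlinarith
    have hdc : d1 ≤ PySem.Int.floordiv n d1 := le_fdiv n d1 (by omega) hd1sq
    rcases D2 with _ | ⟨d2, rest⟩
    · -- exactly one small divisor d1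
      by_cases hc : PySem.Int.floordiv n d1 = d1
      · have hSx : ∀ x, x ∈ S ↔ x = d1 := by
          intro x
          rw [hmem, hD]
          constructor
          · rintro ⟨i, hi, h2⟩
            simp only [List.mem_singleton] at hi
            rcases h2 with rfl | rfl
            · exact hi
            · rw [hi]; exact hc
          · intro hx
            exact ⟨d1, by simp, Or.inl hx⟩
        have hS1 : S = [d1] := eq_sing S d1 hnd hSx
        have hsorted : PySem.List.sorted S (fun x => x) false = [d1] :=
          PySem.List.sorted_eq_of_perm_of_pairwise_lt S [d1] _ (by rw [hS1]) (by simp)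
        rw [hsorted]
        simp [fSpecFun, after, hc]
      · have hlt : d1 < PySem.Int.floordiv n d1 := by omega
        have hperm : ([d1, PySem.Int.floordiv n d1] : List Int).Perm S := by
          rw [List.perm_ext_iff_of_nodup (by simp; omega) hnd]
          intro x
          rw [hmem, hD]
          constructor
          · intro hx
            simp only [List.mem_cons, List.not_mem_nil, or_false] at hx
            rcases hx with hx | hx
            · exact ⟨d1, by simp, Or.inl hx⟩
            · exact ⟨d1, by simp, Or.inr hx⟩
          · rintro ⟨i, hi, h2⟩
            simp only [List.mem_singleton] at hi
            rcases h2 with rfl | rfl <;> rw [hi] <;> simp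
        have hsorted : PySem.List.sorted S (fun x => x) false = [d1, PySem.Int.floordiv n d1] :=
          PySem.List.sorted_eq_of_perm_of_pairwise_lt S _ _ hperm (by simp [hlt])
        rw [hsorted]
        rw [if_pos (by simp)]
        rw [show ([d1, PySem.Int.floordiv n d1] : List Int) = [] ++ [d1, PySem.Int.floordiv n d1] from rfl,
          getD_last1, getD_last2]
        simp [fSpecFun, after, hc]; omega
    · -- at least two small divisors d1 < d2
      obtain ⟨hd2', hdr2, hdvd2⟩ := hDfact d2 (by rw [hD]; simp)
      have hd1d2 : d1 < d2 := by
        rw [hD] at hDpair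
        exact (List.pairwise_cons.mp hDpair).1 d2 (by simp)
      set a := PySem.Int.floordiv n d1 with hadef
      set b := PySem.Int.floordiv n d2 with hbdef
      have hba : b < a := by
        have hle : b ≤ a := fdiv_mono n d1 d2 (by omega) (by omega) hn
        have hne : b ≠ a := fun h => by
          have := fdiv_inj n d2 d1 (by omega) (by omega) hdvd2 hdvd hnpos h
          omega
        omega
      set ds := PySem.List.sorted S (fun x => x) false with hdsdef
      have hperm : ds.Perm S := PySem.List.sorted_perm S _ false
      have hndds : ds.Nodup := hperm.nodup_iff.mpr hnd
      have hpairle : ds.Pairwise (· ≤ ·) := PySem.List.sorted_pairwise S (fun x => x)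
      have hpairlt : ds.Pairwise (· < ·) := by
        have := hpairle.and hndds
        exact this.imp (fun h => lt_of_le_of_ne h.1 h.2)
      have hmds : ∀ x, x ∈ ds ↔ x ∈ S := fun x => hperm.mem_iff
      have ha : a ∈ ds := (hmds a).mpr ((hmem a).mpr ⟨d1, by rw [hD]; simp, Or.inr rfl⟩)
      have hb : b ∈ ds := (hmds b).mpr ((hmem b).mpr ⟨d2, by rw [hD]; simp, Or.inr rfl⟩)
      have hub : ∀ x ∈ ds, x = a ∨ x ≤ b := by
        intro x hx
        obtain ⟨i, hi, h2⟩ := (hmem x).mp ((hmds x).mp hx)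
        obtain ⟨hi2, hir, hidvd⟩ := hDfact i hi
        rcases h2 with rfl | rfl
        · -- x = i ≤ r ≤ n // d2 = b
          right
          have h1 : r ≤ PySem.Int.floordiv n r := le_fdiv n r (by omega) hrsq
          have h2 : PySem.Int.floordiv n r ≤ b := fdiv_mono n d2 r (by omega) (by omega) hn
          omega
        · -- x = n // i
          rw [hD] at hi
          rcases List.mem_cons.mp hi with rfl | hi'
          · exact Or.inl rfl
          · right
            have hd2i : d2 ≤ i := by
              rcases List.mem_cons.mp hi' with rfl | hi''
              · omega
              · rw [hD] at hDpair
                have h := (List.pairwise_cons.mp ((List.pairwise_cons.mp hDpair).2)).1 i hi''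
                omega
            exact fdiv_mono n d2 i (by omega) hd2i hn
      obtain ⟨t, hds⟩ := last_two ds a b hpairlt hba ha hb hub
      rw [hds, if_pos (by simp), getD_last1, getD_last2]
      simp [fSpecFun]; omega

-- ===== VERDICT (by name: the statement is the Claim_ definition above) =====
theorem f_spec : Claim_equal_f := by
  intro n _ hpre
  unfold Spec_f f_alt
  rw [f_eq_spec n hpre, fGo_spec n hpre (Int.ofNat (Nat.sqrt n.toNat) + 1 - 2).toNat 2 0 (by omega) rfl]
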